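-- pv_equiv track=rewrite | github.com/Nestlink-org/rsl-engine | app/agent/model_validator.py | detect_claim_type
-- ===== SOURCE A (Python) =====
-- from typing import Any, Dict, List, Optional, Tuple
--
-- CBC_LAB_FEATURES = ["HGB", "HCT", "MCV", "MCHC", "NEU", "LYM", "EOS", "BAS", "MON", "PLT"]
--
-- HBA1C_LAB_FEATURES = ["HBA1C", "CREATININE", "UREA"]
--
-- def detect_claim_type(claim: Dict[str, Any]) -> str:
--     """
--     Detect whether a claim is CBC or HBA1C based on which lab fields are present.
--     Returns 'cbc', 'hba1c', or 'unknown'.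
--     """
--     has_cbc = any(
--         claim.get(f) is not None and str(claim.get(f, "")).strip() not in ("", "null", "None")
--         for f in CBC_LAB_FEATURES
--     )
--     has_hba1c = any(
--         claim.get(f) is not None and str(claim.get(f, "")).strip() not in ("", "null", "None")
--         for f in HBA1C_LAB_FEATURES
--     )
--     if has_cbc:
--         return "cbc"
--     if has_hba1c:
--         return "hba1c"
--     return "unknown"
-- ===== SOURCE B (Python) =====
-- CBC_LAB_FEATURES = ["HGB", "HCT", "MCV", "MCHC", "NEU", "LYM", "EOS", "BAS", "MON", "PLT"]
--
-- HBA1C_LAB_FEATURES = ["HBA1C", "CREATININE", "UREA"]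
--
-- _CBC_SET = set(CBC_LAB_FEATURES)
-- _HBA1C_SET = set(HBA1C_LAB_FEATURES)
--
--
-- def _valid(v):
--     return v is not None and str(v).strip() not in ("", "null", "None")
--
--
-- def detect_claim_type(claim):
--     """One pass over the claim's own items instead of probing every candidate field."""
--     has_cbc = False
--     has_hba1c = False
--     for k, v in claim.items():
--         if _valid(v):
--             if k in _CBC_SET:
--                 has_cbc = True
--             elif k in _HBA1C_SET:
--                 has_hba1c = True
--     if has_cbc:
--         return "cbc"
--     if has_hba1c:
--         return "hba1c"
--     return "unknown"
-- ===== Notes on version B (the rewrite author's own statement) =====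
-- stated objective: alternative
-- what changed: B makes a single pass over the claim's own items, classifying each present key against the two feature sets, instead of A's two short-circuit scans over the candidate feature lists with a dict lookup per candidate; Pre_ excludes association lists with duplicate keys, where first-match lookup order is an artefact of the dict encoding (no Python dict has duplicate keys).
import Mathlib
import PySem

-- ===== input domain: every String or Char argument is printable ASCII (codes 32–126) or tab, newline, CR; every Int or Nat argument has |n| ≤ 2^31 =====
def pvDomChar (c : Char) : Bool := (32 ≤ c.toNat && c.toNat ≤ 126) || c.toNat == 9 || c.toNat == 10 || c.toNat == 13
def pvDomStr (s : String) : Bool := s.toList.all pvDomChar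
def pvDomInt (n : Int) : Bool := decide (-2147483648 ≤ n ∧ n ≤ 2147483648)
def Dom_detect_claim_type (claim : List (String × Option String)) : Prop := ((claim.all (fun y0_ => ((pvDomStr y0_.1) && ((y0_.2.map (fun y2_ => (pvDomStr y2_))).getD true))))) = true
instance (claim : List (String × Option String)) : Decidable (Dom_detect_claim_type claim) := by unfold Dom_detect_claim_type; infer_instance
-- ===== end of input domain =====

-- B replaces A's two short-circuit scans over the candidate feature lists by one pass over the
-- claim's own items against two feature sets (objective: alternative, same cost).

def CBC_LAB_FEATURES : List String := ["HGB", "HCT", "MCV", "MCHC", "NEU", "LYM", "EOS", "BAS", "MON", "PLT"]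

def HBA1C_LAB_FEATURES : List String := ["HBA1C", "CREATININE", "UREA"]

-- ===== PORT A =====
-- claim.get(f) is not None and str(claim.get(f, "")).strip() not in ("", "null", "None")
-- (values are Option String: a stored None or a missing key both make claim.get(f) None)
def pvPresentA (claim : List (String × Option String)) (f : String) : Bool :=
  match (PySem.Dict.mk claim).get? f with
  | none => false
  | some none => false
  | some (some s) =>
      let t := PySem.Str.strip s
      !(t == "" || t == "null" || t == "None")

def detect_claim_type (claim : List (String × Option String)) : String :=
  let has_cbc := CBC_LAB_FEATURES.any (fun f => pvPresentA claim f)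
  let has_hba1c := HBA1C_LAB_FEATURES.any (fun f => pvPresentA claim f)
  if has_cbc then "cbc" else if has_hba1c then "hba1c" else "unknown"

-- ===== PORT B =====
-- _valid(v) of Source B
def pvValidB (v : Option String) : Bool :=
  match v with
  | none => false
  | some s =>
      let t := PySem.Str.strip s
      !(t == "" || t == "null" || t == "None")

def pvCbcSet : PySem.Set String := PySem.Set.ofList CBC_LAB_FEATURES
def pvHba1cSet : PySem.Set String := PySem.Set.ofList HBA1C_LAB_FEATURES

def detect_claim_type_alt (claim : List (String × Option String)) : String :=
  let st := claim.foldl (fun (st : Bool × Bool) p =>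
      if pvValidB p.2 then
        if PySem.Set.contains pvCbcSet p.1 then (true, st.2)
        else if PySem.Set.contains pvHba1cSet p.1 then (st.1, true)
        else st
      else st) (false, false)
  if st.1 then "cbc" else if st.2 then "hba1c" else "unknown"

-- ===== PRECONDITION & SPEC =====
-- Pre_ excludes association lists with duplicate keys: no Python dict can carry two entries for
-- one key, so A's first-match lookup there is an artefact of the assoc-list encoding.
def Pre_detect_claim_type (claim : List (String × Option String)) : Prop :=
  (claim.map Prod.fst).Nodup
instance (claim : List (String × Option String)) : Decidable (Pre_detect_claim_type claim) := by
  unfold Pre_detect_claim_type; infer_instance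

def pvWitness_detect_claim_type : (List (String × Option String)) :=
  [("HGB", some "12"), ("UREA", none)]

def Spec_detect_claim_type (claim : List (String × Option String)) (out : String) : Prop := out = detect_claim_type_alt claim
instance (claim : List (String × Option String)) (out : String) : Decidable (Spec_detect_claim_type claim out) := by unfold Spec_detect_claim_type; infer_instance

-- ===== CLAIM (what is proved, stated in full; the proofs are below) =====
def Claim_equal_detect_claim_type : Prop := ∀ (claim : List (String × Option String)), Dom_detect_claim_type claim → Pre_detect_claim_type claim → Spec_detect_claim_type claim (detect_claim_type claim)

-- ===== LEMMAS AND PROOFS =====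

-- under nodup keys, first-match lookup is plain membership
theorem pv_get_mem (claim : List (String × Option String)) (f : String) (v : Option String)
    (h : (claim.map Prod.fst).Nodup) :
    ((PySem.Dict.mk claim).get? f = some v) ↔ (f, v) ∈ claim := by
  induction claim with
  | nil => simp [PySem.Dict.get?]
  | cons p rest ih =>
    obtain ⟨k, w⟩ := p
    simp only [List.map_cons, List.nodup_cons] at h
    rw [PySem.Dict.get?_mk_cons]
    by_cases hk : k = f
    · subst hk
      simp only [beq_self_eq_true, if_true, List.mem_cons, Option.some.injEq]
      constructor
      · rintro rfl; left; rfl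
      · rintro (hp | hp)
        · cases hp; rfl
        · exact absurd (List.mem_map_of_mem hp) h.1
    · simp only [List.mem_cons]
      rw [if_neg (by simpa using hk)]
      rw [ih h.2]
      constructor
      · exact Or.inr
      · rintro (hp | hp)
        · cases hp; exact absurd rfl hk
        · exact hp

theorem pv_presentA_iff (claim : List (String × Option String)) (f : String)
    (h : (claim.map Prod.fst).Nodup) :
    pvPresentA claim f = true ↔ ∃ v, (f, v) ∈ claim ∧ pvValidB v = true := by
  unfold pvPresentA
  cases hg : (PySem.Dict.mk claim).get? f with
  | none =>
    simp only [Bool.false_eq_true, false_iff]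
    rintro ⟨v, hv, _⟩
    rw [← pv_get_mem claim f v h] at hv
    simp [hv] at hg
  | some v =>
    have hmem : (f, v) ∈ claim := (pv_get_mem claim f v h).1 hg
    have huniq : ∀ w, (f, w) ∈ claim → w = v := by
      intro w hw
      have hw' := (pv_get_mem claim f w h).2 hw
      rw [hg] at hw'
      exact (Option.some.injEq _ _ ▸ hw').symm
    constructor
    · intro hp
      refine ⟨v, hmem, ?_⟩
      cases v with
      | none => simp at hp
      | some s => simpa [pvValidB] using hp
    · rintro ⟨w, hw, hval⟩
      have := huniq w hw; subst this
      cases w with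
      | none => simp [pvValidB] at hval
      | some s => simpa [pvValidB] using hval

-- scanning a feature list with lookups = scanning the claim with membership
theorem pv_any_swap (F : List String) (claim : List (String × Option String))
    (h : (claim.map Prod.fst).Nodup) :
    F.any (fun f => pvPresentA claim f)
      = claim.any (fun p => pvValidB p.2 && decide (p.1 ∈ F)) := by
  rw [Bool.eq_iff_iff]
  simp only [List.any_eq_true, Bool.and_eq_true, decide_eq_true_eq]
  constructor
  · rintro ⟨f, hf, hp⟩
    obtain ⟨v, hv, hval⟩ := (pv_presentA_iff claim f h).1 hp
    exact ⟨(f, v), hv, hval, hf⟩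
  · rintro ⟨p, hp, hval, hf⟩
    exact ⟨p.1, hf, (pv_presentA_iff claim p.1 h).2 ⟨p.2, by simpa using hp, hval⟩⟩

-- characterisation of B's fold
theorem pv_fold_char (claim : List (String × Option String)) (c h : Bool) :
    claim.foldl (fun (st : Bool × Bool) p =>
      if pvValidB p.2 then
        if PySem.Set.contains pvCbcSet p.1 then (true, st.2)
        else if PySem.Set.contains pvHba1cSet p.1 then (st.1, true)
        else st
      else st) (c, h)
    = (c || claim.any (fun p => pvValidB p.2 && PySem.Set.contains pvCbcSet p.1),
       h || claim.any (fun p => pvValidB p.2 && !PySem.Set.contains pvCbcSet p.1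
              && PySem.Set.contains pvHba1cSet p.1)) := by
  induction claim generalizing c h with
  | nil => simp
  | cons p rest ih =>
    rw [List.foldl_cons, List.any_cons, List.any_cons]
    cases hv : pvValidB p.2 with
    | false => rw [ih]; simp
    | true =>
      cases h1 : PySem.Set.contains pvCbcSet p.1 with
      | true => rw [ih]; simp
      | false =>
        cases h2 : PySem.Set.contains pvHba1cSet p.1 with
        | true => rw [ih]; simp
        | false => rw [ih]; simp

theorem pv_cbc_contains (k : String) :
    PySem.Set.contains pvCbcSet k = decide (k ∈ CBC_LAB_FEATURES) := by
  rw [Bool.eq_iff_iff]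
  simp [pvCbcSet, PySem.Set.contains, PySem.Set.mem_ofList]

theorem pv_hba_contains (k : String) :
    (!PySem.Set.contains pvCbcSet k && PySem.Set.contains pvHba1cSet k)
      = decide (k ∈ HBA1C_LAB_FEATURES) := by
  rw [Bool.eq_iff_iff]
  simp only [Bool.and_eq_true, Bool.not_eq_true', decide_eq_true_eq, pvHba1cSet, pvCbcSet,
    PySem.Set.contains, PySem.Set.mem_ofList]
  constructor
  · rintro ⟨-, h2⟩; simpa using h2
  · intro h2
    have hne : k ∉ CBC_LAB_FEATURES := by
      simp only [HBA1C_LAB_FEATURES, List.mem_cons, List.not_mem_nil, or_false] at h2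
      rcases h2 with rfl | rfl | rfl <;> decide
    refine ⟨?_, by simpa using h2⟩
    simpa using hne

-- ===== VERDICT (by name: the statement is the Claim_ definition above) =====
theorem detect_claim_type_spec : Claim_equal_detect_claim_type := by
  intro claim _ hpre
  unfold Spec_detect_claim_type detect_claim_type detect_claim_type_alt
  rw [pv_fold_char]
  simp only [Bool.false_or]
  rw [pv_any_swap CBC_LAB_FEATURES claim hpre, pv_any_swap HBA1C_LAB_FEATURES claim hpre]
  have e1 : (claim.any fun p => pvValidB p.2 && decide (p.1 ∈ CBC_LAB_FEATURES))
      = claim.any fun p => pvValidB p.2 && PySem.Set.contains pvCbcSet p.1 :=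
    congrArg (List.any claim) (funext fun p => by rw [pv_cbc_contains])
  have e2 : (claim.any fun p => pvValidB p.2 && decide (p.1 ∈ HBA1C_LAB_FEATURES))
      = claim.any fun p => pvValidB p.2 && !PySem.Set.contains pvCbcSet p.1
          && PySem.Set.contains pvHba1cSet p.1 :=
    congrArg (List.any claim) (funext fun p => by rw [Bool.and_assoc, pv_hba_contains])
  rw [e1, e2]
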